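-- pv_equiv track=rewrite | github.com/junhyr/lucy | scripts/phase4/multi_gpu_baseline.py | get_block_split
-- ===== SOURCE A (Python) =====
-- def get_block_split(world_size, total_blocks=30):
--     """Compute balanced block split for N GPUs."""
--     blocks_per_gpu = total_blocks // world_size
--     remainder = total_blocks % world_size
--     splits = []
--     start = 0
--     for i in range(world_size):
--         end = start + blocks_per_gpu + (1 if i < remainder else 0)
--         splits.append([start, end])
--         start = end
--     return splits
-- ===== SOURCE B (Python) =====
-- def get_block_split(world_size, total_blocks=30):
--     """Compute balanced block split for N GPUs (closed form, no running accumulator)."""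
--     q, r = total_blocks // world_size, total_blocks % world_size
--     return [[i * q + min(i, r), (i + 1) * q + min(i + 1, r)] for i in range(world_size)]
-- ===== Notes on version B (the rewrite author's own statement) =====
-- stated objective: alternative
-- what changed: Replaces the running start/end accumulator loop with a stateless comprehension deriving each GPU's range directly from its index via the closed form i*q + min(i, r).
import Mathlib
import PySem

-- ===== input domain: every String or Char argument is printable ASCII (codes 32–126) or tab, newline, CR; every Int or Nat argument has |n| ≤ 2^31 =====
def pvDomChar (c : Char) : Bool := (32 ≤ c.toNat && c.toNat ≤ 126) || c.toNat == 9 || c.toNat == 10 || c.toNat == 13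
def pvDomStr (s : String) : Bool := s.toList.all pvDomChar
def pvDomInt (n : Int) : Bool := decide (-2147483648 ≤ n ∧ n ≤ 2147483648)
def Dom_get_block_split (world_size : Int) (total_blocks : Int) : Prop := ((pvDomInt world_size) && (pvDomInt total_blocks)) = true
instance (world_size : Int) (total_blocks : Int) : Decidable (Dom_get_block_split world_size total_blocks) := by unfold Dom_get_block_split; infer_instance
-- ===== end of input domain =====

-- B replaces A's running start/end accumulator with a stateless closed form per index (alternative decomposition, same cost).


-- ===== PORT A =====
-- literal port: running accumulator `start`, appending [start, end] each step
def get_block_split (world_size : Int) (total_blocks : Int) : List (List Int) :=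
  let blocks_per_gpu := PySem.Int.floordiv total_blocks world_size
  let remainder := PySem.Int.mod total_blocks world_size
  let st := (PySem.List.pyRange 0 world_size 1).foldl
    (fun (st : List (List Int) × Int) i =>
      let e := st.2 + blocks_per_gpu + (if i < remainder then 1 else 0)
      (st.1 ++ [[st.2, e]], e))
    ([], 0)
  st.1

-- ===== PORT B =====
-- literal port of Source B: each range computed directly from its index, no per-iteration state
def get_block_split_alt (world_size : Int) (total_blocks : Int) : List (List Int) :=
  let q := PySem.Int.floordiv total_blocks world_size
  let r := PySem.Int.mod total_blocks world_size
  (PySem.List.pyRange 0 world_size 1).map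
    (fun i => [i * q + min i r, (i + 1) * q + min (i + 1) r])

-- ===== PRECONDITION & SPEC =====
-- A raises ZeroDivisionError when world_size = 0; excluded (B raises there too).
def Pre_get_block_split (world_size : Int) (total_blocks : Int) : Prop := world_size ≠ 0
instance (world_size : Int) (total_blocks : Int) : Decidable (Pre_get_block_split world_size total_blocks) := by unfold Pre_get_block_split; infer_instance
def pvWitness_get_block_split : Int × Int := (4, 30)

def Spec_get_block_split (world_size : Int) (total_blocks : Int) (out : List (List Int)) : Prop := out = get_block_split_alt world_size total_blocks
instance (world_size : Int) (total_blocks : Int) (out : List (List Int)) : Decidable (Spec_get_block_split world_size total_blocks out) := by unfold Spec_get_block_split; infer_instance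

-- ===== CLAIM (what is proved, stated in full; the proofs are below) =====
def Claim_equal_get_block_split : Prop := ∀ (world_size : Int) (total_blocks : Int), Dom_get_block_split world_size total_blocks → Pre_get_block_split world_size total_blocks → Spec_get_block_split world_size total_blocks (get_block_split world_size total_blocks)

-- ===== LEMMAS AND PROOFS =====

-- the step's running `start` equals the closed form i*q + min i r when remainder ≥ 0 at the base
theorem pv_fold_invariant (q r : Int) (n : Nat) (hr : 0 ≤ r) :
    (PySem.List.pyRange 0 (n : Int) 1).foldl
      (fun (st : List (List Int) × Int) i =>
        let e := st.2 + q + (if i < r then 1 else 0)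
        (st.1 ++ [[st.2, e]], e))
      ([], 0)
    = ((PySem.List.pyRange 0 (n : Int) 1).map
        (fun i => [i * q + min i r, (i + 1) * q + min (i + 1) r]),
       (n : Int) * q + min (n : Int) r) := by
  induction n with
  | zero => simp [PySem.List.pyRange_one_eq_nil, min_eq_left hr]
  | succ n ih =>
    have h1 : ((n : Int) + 1 : Int) = ((n + 1 : Nat) : Int) := by push_cast; ring
    have h2 := PySem.List.pyRange_one_succ_right (a := 0) (b := (n : Int)) (by positivity)
    rw [← h1, h2, List.foldl_append, List.map_append, ih]
    simp only [List.foldl_cons, List.foldl_nil, List.map_cons, List.map_nil]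
    have key : (n : Int) * q + min (n : Int) r + q + (if (n : Int) < r then 1 else 0)
         = ((n : Int) + 1) * q + min ((n : Int) + 1) r := by
      rcases lt_or_ge (n : Int) r with h | h
      · rw [if_pos h, min_eq_left h.le, min_eq_left (by omega)]; ring
      · rw [if_neg (not_lt.mpr h), min_eq_right h, min_eq_right (by omega)]; ring
    rw [key]

-- ===== VERDICT (by name: the statement is the Claim_ definition above) =====
theorem get_block_split_spec : Claim_equal_get_block_split := by
  intro w t _ hw
  unfold Spec_get_block_split get_block_split get_block_split_alt
  rcases lt_trichotomy w 0 with hneg | hzero | hpos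
  · simp [PySem.List.pyRange_one_eq_nil hneg.le]
  · exact absurd hzero hw
  · obtain ⟨n, rfl⟩ : ∃ n : Nat, w = (n : Int) := ⟨w.toNat, (Int.toNat_of_nonneg hpos.le).symm⟩
    have hr : 0 ≤ PySem.Int.mod t (n : Int) := PySem.Int.mod_nonneg t hpos
    simp only []
    rw [pv_fold_invariant _ _ n hr]
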